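-- pv_equiv track=rewrite | github.com/martellileo/Complexidade-de-Algoritmos | Programação Dinamica/Tabelas.py | tabela_lucro
-- ===== SOURCE A (Python) =====
-- def tabela_lucro(itens, capacidade_max):
--     n = len(itens)
--     dp = [[0] * (capacidade_max + 1) for _ in range(n)]
--
--     for i in range(n):
--         peso_i, valor_i = itens[i]
--         for w in range(1, capacidade_max + 1):
--             if peso_i > w:
--                 dp[i][w] = dp[i-1][w] if i > 0 else 0
--             else:
--                 sem_item = dp[i-1][w] if i > 0 else 0
--                 com_item = valor_i + (dp[i-1][w - peso_i] if i > 0 else 0)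
--                 dp[i][w] = max(sem_item, com_item)
--
--     return dp
-- ===== SOURCE B (Python) =====
-- def tabela_lucro(itens, capacidade_max):
--     cache = {}
--
--     def solve(i, w):
--         if i < 0 or w <= 0:
--             return 0
--         if (i, w) in cache:
--             return cache[(i, w)]
--         peso_i, valor_i = itens[i]
--         if peso_i > w:
--             r = solve(i - 1, w)
--         else:
--             r = max(solve(i - 1, w), valor_i + solve(i - 1, w - peso_i))
--         cache[(i, w)] = r
--         return r
--
--     return [[solve(i, w) for w in range(capacidade_max + 1)]
--             for i in range(len(itens))]
-- ===== Notes on version B (the rewrite author's own statement) =====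
-- stated objective: alternative
-- what changed: A fills the n x (capacidade_max+1) profit table bottom-up with nested index loops over a mutable 2D array; B computes each cell with a memoized top-down recursion solve(i, w) over a dict cache and assembles the table from those calls.
import Mathlib
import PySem

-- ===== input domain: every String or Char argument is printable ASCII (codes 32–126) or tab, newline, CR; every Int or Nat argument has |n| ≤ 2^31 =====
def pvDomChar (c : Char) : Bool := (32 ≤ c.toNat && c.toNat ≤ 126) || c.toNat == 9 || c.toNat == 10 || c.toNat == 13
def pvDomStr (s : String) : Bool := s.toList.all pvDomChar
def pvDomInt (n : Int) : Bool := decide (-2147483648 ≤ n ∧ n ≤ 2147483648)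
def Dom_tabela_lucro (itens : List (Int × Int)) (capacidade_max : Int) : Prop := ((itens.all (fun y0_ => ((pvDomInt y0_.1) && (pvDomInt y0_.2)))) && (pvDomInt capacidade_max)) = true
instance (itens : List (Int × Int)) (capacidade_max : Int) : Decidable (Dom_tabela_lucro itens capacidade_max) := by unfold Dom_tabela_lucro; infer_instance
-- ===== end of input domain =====

-- B replaces A's bottom-up nested-loop DP table fill with a memoized top-down recursion
-- (alternative decomposition, same asymptotic cost); equal return values on Pre_.

-- ===== PORT A =====
-- All indices A uses are in range on Pre_ inputs, so the pyGetD/pySetD defaults below are never taken there.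
def tabela_lucro (itens : List (Int × Int)) (capacidade_max : Int) : List (List Int) :=
  let n : Int := itens.length
  let dp0 : List (List Int) :=
    (List.range itens.length).map (fun _ => List.replicate (capacidade_max + 1).toNat 0)
  (PySem.List.pyRange 0 n 1).foldl (fun dp i =>
    let pv := PySem.List.pyGetD itens i (0, 0)
    (PySem.List.pyRange 1 (capacidade_max + 1) 1).foldl (fun dp w =>
      let v : Int :=
        if pv.1 > w then
          (if i > 0 then PySem.List.pyGetD (PySem.List.pyGetD dp (i - 1) []) w 0 else 0)
        else
          let sem_item := if i > 0 then PySem.List.pyGetD (PySem.List.pyGetD dp (i - 1) []) w 0 else 0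
          let com_item := pv.2 + (if i > 0 then PySem.List.pyGetD (PySem.List.pyGetD dp (i - 1) []) (w - pv.1) 0 else 0)
          max sem_item com_item
      PySem.List.pySetD dp i (PySem.List.pySetD (PySem.List.pyGetD dp i []) w v)) dp) dp0

-- ===== PORT B =====
-- solve(i, w) of Source B; the mutable cache dict is threaded as the second component.
-- The recursion descends on i and stops at i < 0, so it is driven by the structural
-- fuel (i + 1).toNat, which is exact: the fuel-0 fallback (0, cache) is never reached.
def solveBgo (itens : List (Int × Int)) (k : Nat) (cache : PySem.Dict (Int × Int) Int)
    (i w : Int) : Int × PySem.Dict (Int × Int) Int :=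
  if i < 0 ∨ w ≤ 0 then (0, cache)
  else
    match cache.get? (i, w) with
    | some r => (r, cache)
    | none =>
      match k with
      | 0 => (0, cache)  -- unreachable: every call has (i + 1).toNat ≤ k
      | k + 1 =>
        let pv := PySem.List.pyGetD itens i (0, 0)
        if pv.1 > w then
          let s := solveBgo itens k cache (i - 1) w
          (s.1, s.2.insert (i, w) s.1)
        else
          let s1 := solveBgo itens k cache (i - 1) w
          let s2 := solveBgo itens k s1.2 (i - 1) (w - pv.1)
          let r := max s1.1 (pv.2 + s2.1)
          (r, s2.2.insert (i, w) r)

def solveB (itens : List (Int × Int)) (cache : PySem.Dict (Int × Int) Int) (i w : Int) :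
    Int × PySem.Dict (Int × Int) Int :=
  solveBgo itens (i + 1).toNat cache i w

def tabela_lucro_alt (itens : List (Int × Int)) (capacidade_max : Int) : List (List Int) :=
  ((PySem.List.pyRange 0 (itens.length : Int) 1).foldl (fun acc i =>
    let inner := (PySem.List.pyRange 0 (capacidade_max + 1) 1).foldl (fun acc2 w =>
      let s := solveB itens acc2.2 i w
      (acc2.1 ++ [s.1], s.2)) (([] : List Int), acc.2)
    (acc.1 ++ [inner.1], inner.2))
    (([] : List (List Int)), (PySem.Dict.empty : PySem.Dict (Int × Int) Int))).1

-- ===== PRECONDITION & SPEC =====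
-- A raises IndexError (dp[i-1][w - peso_i] reads past the row end) exactly when capacidade_max ≥ 1
-- and some item after the first has a negative weight; Pre_ excludes exactly those inputs.
def Pre_tabela_lucro (itens : List (Int × Int)) (capacidade_max : Int) : Prop :=
  capacidade_max ≤ 0 ∨ ∀ item ∈ itens.tail, 0 ≤ item.1
instance (itens : List (Int × Int)) (capacidade_max : Int) : Decidable (Pre_tabela_lucro itens capacidade_max) := by unfold Pre_tabela_lucro; infer_instance

def pvWitness_tabela_lucro : (List (Int × Int)) × Int := ([(2, 3), (1, 2), (3, 4)], 5)

def Spec_tabela_lucro (itens : List (Int × Int)) (capacidade_max : Int) (out : List (List Int)) : Prop := out = tabela_lucro_alt itens capacidade_max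
instance (itens : List (Int × Int)) (capacidade_max : Int) (out : List (List Int)) : Decidable (Spec_tabela_lucro itens capacidade_max out) := by unfold Spec_tabela_lucro; infer_instance

-- ===== CLAIM (what is proved, stated in full; the proofs are below) =====
def Claim_equal_tabela_lucro : Prop := ∀ (itens : List (Int × Int)) (capacidade_max : Int), Dom_tabela_lucro itens capacidade_max → Pre_tabela_lucro itens capacidade_max → Spec_tabela_lucro itens capacidade_max (tabela_lucro itens capacidade_max)


-- ===== LEMMAS AND PROOFS =====

-- The pure value of Source B's solve(i, w) (proof-side specification of the memoized recursion).
def solveP (itens : List (Int × Int)) (i w : Int) : Int :=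
  if _h : i < 0 ∨ w ≤ 0 then 0
  else
    let pv := PySem.List.pyGetD itens i (0, 0)
    if pv.1 > w then solveP itens (i - 1) w
    else max (solveP itens (i - 1) w) (pv.2 + solveP itens (i - 1) (w - pv.1))
termination_by (i + 1).toNat
decreasing_by all_goals omega

-- every value stored in the cache is the pure value
def GoodC (itens : List (Int × Int)) (c : PySem.Dict (Int × Int) Int) : Prop :=
  ∀ p r, c.get? p = some r → r = solveP itens p.1 p.2

theorem goodC_empty (itens : List (Int × Int)) : GoodC itens PySem.Dict.empty := by
  intro p r h
  simp [PySem.Dict.get?_empty] at h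

theorem goodC_insert (itens : List (Int × Int)) (c : PySem.Dict (Int × Int) Int)
    (i w r : Int) (hc : GoodC itens c) (hr : r = solveP itens i w) :
    GoodC itens (c.insert (i, w) r) := by
  intro p r' h
  rw [PySem.Dict.get?_insert] at h
  split at h
  · rename_i hp
    subst hp
    cases h
    simpa using hr
  · exact hc _ _ h

theorem solveBgo_spec (itens : List (Int × Int)) :
    ∀ (k : Nat) (i w : Int) (c : PySem.Dict (Int × Int) Int), (i + 1).toNat ≤ k → GoodC itens c →
      (solveBgo itens k c i w).1 = solveP itens i w ∧ GoodC itens (solveBgo itens k c i w).2 := by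
  intro k
  induction k with
  | zero =>
    intro i w c hk hc
    have hb : i < 0 ∨ w ≤ 0 := by omega
    rw [solveBgo]
    rw [if_pos hb]
    exact ⟨by rw [solveP, dif_pos hb], hc⟩
  | succ k ih =>
    intro i w c hk hc
    rw [solveBgo]
    by_cases hb : i < 0 ∨ w ≤ 0
    · rw [if_pos hb]
      exact ⟨by rw [solveP, dif_pos hb], hc⟩
    · rw [if_neg hb]
      have hk' : (i - 1 + 1).toNat ≤ k := by omega
      cases hg : c.get? (i, w) with
      | some r => exact ⟨hc _ _ hg, hc⟩
      | none =>
        dsimp only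
        set pv := PySem.List.pyGetD itens i (0, 0) with hpv
        have hP : solveP itens i w =
            (if pv.1 > w then solveP itens (i - 1) w
             else max (solveP itens (i - 1) w) (pv.2 + solveP itens (i - 1) (w - pv.1))) := by
          rw [solveP, dif_neg hb]
        by_cases hp : pv.1 > w
        · rw [if_pos hp]
          obtain ⟨h1, g1⟩ := ih (i - 1) w c hk' hc
          refine ⟨by rw [hP, if_pos hp]; exact h1, ?_⟩
          exact goodC_insert itens _ i w _ g1 (by rw [hP, if_pos hp, ← h1])
        · rw [if_neg hp]
          obtain ⟨h1, g1⟩ := ih (i - 1) w c hk' hc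
          obtain ⟨h2, g2⟩ := ih (i - 1) (w - pv.1) _ hk' g1
          have hval : max (solveBgo itens k c (i - 1) w).1
              (pv.2 + (solveBgo itens k (solveBgo itens k c (i - 1) w).2 (i - 1) (w - pv.1)).1)
              = solveP itens i w := by
            rw [hP, if_neg hp, h1, h2]
          exact ⟨hval, goodC_insert itens _ i w _ g2 hval⟩

theorem solveB_spec (itens : List (Int × Int)) (i w : Int) (c : PySem.Dict (Int × Int) Int)
    (hc : GoodC itens c) :
    (solveB itens c i w).1 = solveP itens i w ∧ GoodC itens (solveB itens c i w).2 :=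
  solveBgo_spec itens _ i w c le_rfl hc

theorem inner_fold (itens : List (Int × Int)) (i : Int) :
    ∀ (l : List Int) (acc : List Int) (c : PySem.Dict (Int × Int) Int), GoodC itens c →
      (l.foldl (fun acc2 w => let s := solveB itens acc2.2 i w; (acc2.1 ++ [s.1], s.2)) (acc, c)).1
          = acc ++ l.map (solveP itens i)
        ∧ GoodC itens
          (l.foldl (fun acc2 w => let s := solveB itens acc2.2 i w; (acc2.1 ++ [s.1], s.2)) (acc, c)).2 := by
  intro l
  induction l with
  | nil => intro acc c hc; exact ⟨by simp, hc⟩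
  | cons w l ih =>
    intro acc c hc
    obtain ⟨h1, g1⟩ := solveB_spec itens i w c hc
    simp only [List.foldl_cons]
    obtain ⟨ha, hg⟩ := ih (acc ++ [(solveB itens c i w).1]) (solveB itens c i w).2 g1
    refine ⟨?_, hg⟩
    rw [ha, h1]
    simp

theorem outer_fold (itens : List (Int × Int)) (capacidade_max : Int) :
    ∀ (l : List Int) (acc : List (List Int)) (c : PySem.Dict (Int × Int) Int), GoodC itens c →
      (l.foldl (fun acc i =>
          let inner := (PySem.List.pyRange 0 (capacidade_max + 1) 1).foldl (fun acc2 w =>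
            let s := solveB itens acc2.2 i w
            (acc2.1 ++ [s.1], s.2)) (([] : List Int), acc.2)
          (acc.1 ++ [inner.1], inner.2)) (acc, c)).1
          = acc ++ l.map (fun i => (PySem.List.pyRange 0 (capacidade_max + 1) 1).map (solveP itens i))
        ∧ GoodC itens
          (l.foldl (fun acc i =>
          let inner := (PySem.List.pyRange 0 (capacidade_max + 1) 1).foldl (fun acc2 w =>
            let s := solveB itens acc2.2 i w
            (acc2.1 ++ [s.1], s.2)) (([] : List Int), acc.2)
          (acc.1 ++ [inner.1], inner.2)) (acc, c)).2 := by
  intro l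
  induction l with
  | nil => intro acc c hc; exact ⟨by simp, hc⟩
  | cons i l ih =>
    intro acc c hc
    obtain ⟨h1, g1⟩ := inner_fold itens i (PySem.List.pyRange 0 (capacidade_max + 1) 1) [] c hc
    simp only [List.foldl_cons]
    obtain ⟨ha, hg⟩ := ih (acc ++ [((PySem.List.pyRange 0 (capacidade_max + 1) 1).foldl (fun acc2 w =>
            let s := solveB itens acc2.2 i w
            (acc2.1 ++ [s.1], s.2)) (([] : List Int), c)).1])
        ((PySem.List.pyRange 0 (capacidade_max + 1) 1).foldl (fun acc2 w =>
            let s := solveB itens acc2.2 i w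
            (acc2.1 ++ [s.1], s.2)) (([] : List Int), c)).2 g1
    refine ⟨?_, hg⟩
    rw [ha, h1]
    simp

theorem alt_eq (itens : List (Int × Int)) (capacidade_max : Int) :
    tabela_lucro_alt itens capacidade_max =
      (PySem.List.pyRange 0 (itens.length : Int) 1).map
        (fun i => (PySem.List.pyRange 0 (capacidade_max + 1) 1).map (solveP itens i)) := by
  unfold tabela_lucro_alt
  obtain ⟨h, -⟩ := outer_fold itens capacidade_max (PySem.List.pyRange 0 (itens.length : Int) 1)
    [] PySem.Dict.empty (goodC_empty itens)
  rw [h]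
  simp

-- ---- A-side: the table A builds, row by row ----

def zerosA (cap : Int) : List Int := List.replicate (cap + 1).toNat 0

def rowT (itens : List (Int × Int)) (cap i : Int) : List Int :=
  (PySem.List.pyRange 0 (cap + 1) 1).map (solveP itens i)

def partialRow (itens : List (Int × Int)) (cap i b : Int) : List Int :=
  (PySem.List.pyRange 0 (cap + 1) 1).map (fun w => if w < b then solveP itens i w else 0)

def tabA (itens : List (Int × Int)) (cap : Int) (j : Nat) : List (List Int) :=
  (List.range itens.length).map (fun t => if t < j then rowT itens cap (t : Int) else zerosA cap)

theorem pySetD_nonneg {a : Type} (xs : List a) (i : Int) (h : 0 ≤ i) (v : a) :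
    PySem.List.pySetD xs i v = xs.set i.toNat v := by
  unfold PySem.List.pySetD PySem.List.pySet? PySem.List.pyIdx?
  split_ifs with h1 <;> simp_all
  exact (List.set_eq_of_length_le (by omega)).symm

theorem solveP_base (itens : List (Int × Int)) {i w : Int} (h : i < 0 ∨ w ≤ 0) :
    solveP itens i w = 0 := by rw [solveP, dif_pos h]

theorem solveP_step (itens : List (Int × Int)) {i w : Int} (hi : 0 ≤ i) (hw : 1 ≤ w) :
    solveP itens i w =
      (if (PySem.List.pyGetD itens i (0, 0)).1 > w then solveP itens (i - 1) w
       else max (solveP itens (i - 1) w)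
         ((PySem.List.pyGetD itens i (0, 0)).2 +
           solveP itens (i - 1) (w - (PySem.List.pyGetD itens i (0, 0)).1))) := by
  rw [solveP, dif_neg (by omega)]

theorem length_rowT (itens : List (Int × Int)) (cap i : Int) :
    (rowT itens cap i).length = (cap + 1).toNat := by
  simp [rowT, PySem.List.length_pyRange_one]

theorem length_partialRow (itens : List (Int × Int)) (cap i b : Int) :
    (partialRow itens cap i b).length = (cap + 1).toNat := by
  simp [partialRow, PySem.List.length_pyRange_one]

theorem length_tabA (itens : List (Int × Int)) (cap : Int) (j : Nat) :
    (tabA itens cap j).length = itens.length := by simp [tabA]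

theorem getElem_tabA (itens : List (Int × Int)) (cap : Int) (j t : Nat) (h : t < itens.length) :
    (tabA itens cap j)[t]'(by simp [tabA]; omega) =
      if t < j then rowT itens cap (t : Int) else zerosA cap := by
  simp [tabA]

theorem partialRow_one (itens : List (Int × Int)) (cap i : Int) :
    partialRow itens cap i 1 = zerosA cap := by
  apply List.ext_getElem
  · simp [length_partialRow, zerosA]
  intro k h1 h2
  simp only [partialRow, List.getElem_map, PySem.List.getElem_pyRange_one, zerosA,
    List.getElem_replicate]
  split_ifs with h3
  · exact solveP_base itens (Or.inr (by omega))
  · rfl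

theorem partialRow_top (itens : List (Int × Int)) (cap i : Int) :
    partialRow itens cap i (cap + 1) = rowT itens cap i := by
  unfold partialRow rowT
  apply List.map_congr_left
  intro w hw
  rw [PySem.List.mem_pyRange_one] at hw
  rw [if_pos hw.2]

theorem rowT_eq_zerosA (itens : List (Int × Int)) (cap i : Int) (hcap : cap ≤ 0) :
    rowT itens cap i = zerosA cap := by
  apply List.ext_getElem
  · simp [length_rowT, zerosA]
  intro k h1 h2
  simp only [rowT, List.getElem_map, PySem.List.getElem_pyRange_one, zerosA,
    List.getElem_replicate]
  rw [length_rowT] at h1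
  exact solveP_base itens (Or.inr (by omega))

theorem tabA_succ (itens : List (Int × Int)) (cap : Int) (j : Nat) (_hj : j < itens.length) :
    (tabA itens cap j).set j (rowT itens cap (j : Int)) = tabA itens cap (j + 1) := by
  apply List.ext_getElem
  · simp [tabA]
  intro t h1 h2
  rw [List.getElem_set]
  rw [List.length_set, length_tabA] at h1
  rw [getElem_tabA itens cap j t h1, getElem_tabA itens cap (j + 1) t h1]
  split_ifs with hjt h3 h4 <;> try omega
  · subst hjt; rfl
  · rfl
  · rfl

theorem tabA_succ_degenerate (itens : List (Int × Int)) (cap : Int) (j : Nat) (hcap : cap ≤ 0) :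
    tabA itens cap (j + 1) = tabA itens cap j := by
  unfold tabA
  apply List.map_congr_left
  intro t _
  split_ifs with h1 h2 <;> try rfl
  · exact rowT_eq_zerosA itens cap t hcap
  · omega

theorem pv_tail_nonneg (itens : List (Int × Int)) (hpre : ∀ item ∈ itens.tail, 0 ≤ item.1)
    (j : Nat) (h1 : 1 ≤ j) (h2 : j < itens.length) :
    0 ≤ (PySem.List.pyGetD itens (j : Int) (0, 0)).1 := by
  rw [PySem.List.pyGetD_natCast, List.getD_eq_getElem _ _ h2]
  apply hpre
  rw [← List.drop_one]
  have hd : (j - 1 : Nat) < (itens.drop 1).length := by simp; omega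
  have := List.getElem_mem hd
  rw [List.getElem_drop] at this
  simpa [show 1 + (j - 1) = j by omega] using this

theorem setRow (itens : List (Int × Int)) (cap i w : Int) (hw1 : 1 ≤ w) (_hw2 : w < cap + 1) :
    PySem.List.pySetD (partialRow itens cap i w) w (solveP itens i w) =
      partialRow itens cap i (w + 1) := by
  rw [pySetD_nonneg _ _ (by omega)]
  apply List.ext_getElem
  · simp [length_partialRow]
  intro k h1 h2
  rw [List.getElem_set]
  simp only [partialRow, List.getElem_map, PySem.List.getElem_pyRange_one]
  rw [List.length_set, length_partialRow] at h1
  by_cases hk : w.toNat = k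
  · rw [if_pos hk, if_pos (by omega)]
    rw [show (0 : Int) + (k : Int) = w by omega]
  · rw [if_neg hk]
    split_ifs with h3 h4 <;> first | rfl | omega

theorem inner_fold_A (itens : List (Int × Int)) (cap : Int) (j : Nat) (hj : j < itens.length)
    (hpv : 1 ≤ j → 0 ≤ (PySem.List.pyGetD itens (j : Int) (0, 0)).1) :
    ∀ (u : Nat), (u : Int) + 1 ≤ cap + 1 →
      (PySem.List.pyRange 1 ((u : Int) + 1) 1).foldl (fun dp w =>
        PySem.List.pySetD dp (j : Int)
          (PySem.List.pySetD (PySem.List.pyGetD dp (j : Int) []) w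
            (if (PySem.List.pyGetD itens (j : Int) (0, 0)).1 > w then
               (if (j : Int) > 0 then
                  PySem.List.pyGetD (PySem.List.pyGetD dp ((j : Int) - 1) []) w 0 else 0)
             else
               max (if (j : Int) > 0 then
                  PySem.List.pyGetD (PySem.List.pyGetD dp ((j : Int) - 1) []) w 0 else 0)
                 ((PySem.List.pyGetD itens (j : Int) (0, 0)).2 +
                   (if (j : Int) > 0 then
                      PySem.List.pyGetD (PySem.List.pyGetD dp ((j : Int) - 1) [])
                        (w - (PySem.List.pyGetD itens (j : Int) (0, 0)).1) 0 else 0)))))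
        (tabA itens cap j)
      = (tabA itens cap j).set j (partialRow itens cap (j : Int) ((u : Int) + 1)) := by
  intro u
  induction u with
  | zero =>
    intro _
    rw [show ((0 : Nat) : Int) + 1 = 1 by norm_num]
    rw [PySem.List.pyRange_one_eq_nil (le_refl 1)]
    rw [List.foldl_nil, partialRow_one]
    have hlen : j < (tabA itens cap j).length := by rw [length_tabA]; exact hj
    have hz : (tabA itens cap j)[j]'hlen = zerosA cap := by
      rw [getElem_tabA itens cap j j hj]; simp
    conv_rhs => rw [← hz, List.set_getElem_self]
  | succ u ih =>
    intro hu
    have hcast : (((u + 1 : Nat)) : Int) + 1 = ((u : Int) + 1) + 1 := by push_cast; ring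
    rw [hcast, PySem.List.pyRange_one_succ_right (by omega), List.foldl_append,
      ih (by push_cast at hu; omega), List.foldl_cons, List.foldl_nil]
    set w : Int := (u : Int) + 1 with hwdef
    have hw1 : (1 : Int) ≤ w := by omega
    have hw2 : w < cap + 1 := by push_cast at hu; omega
    set dp' := (tabA itens cap j).set j (partialRow itens cap (j : Int) w) with hdp
    have hreadj : PySem.List.pyGetD dp' (j : Int) [] = partialRow itens cap (j : Int) w := by
      rw [PySem.List.pyGetD_natCast,
        List.getD_eq_getElem _ _ (by rw [List.length_set, length_tabA]; exact hj),
        List.getElem_set, if_pos rfl]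
    have hR1 : (if (j : Int) > 0 then
        PySem.List.pyGetD (PySem.List.pyGetD dp' ((j : Int) - 1) []) w 0 else 0)
        = solveP itens ((j : Int) - 1) w := by
      by_cases hj0 : (j : Int) > 0
      · rw [if_pos hj0]
        have hj1 : 1 ≤ j := by omega
        have hprev : PySem.List.pyGetD dp' ((j : Int) - 1) [] = rowT itens cap ((j : Int) - 1) := by
          rw [show (j : Int) - 1 = ((j - 1 : Nat) : Int) by omega, PySem.List.pyGetD_natCast,
            List.getD_eq_getElem _ _ (by rw [List.length_set, length_tabA]; omega),
            List.getElem_set, if_neg (by omega), getElem_tabA itens cap j (j - 1) (by omega),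
            if_pos (by omega)]
        rw [hprev, rowT, PySem.List.pyGetD_map_pyRange_of_nonneg _ _ _ _ (by omega) hw2]
      · rw [if_neg hj0]
        exact (solveP_base itens (Or.inl (by omega))).symm
    have hv : (if (PySem.List.pyGetD itens (j : Int) (0, 0)).1 > w then
          (if (j : Int) > 0 then
             PySem.List.pyGetD (PySem.List.pyGetD dp' ((j : Int) - 1) []) w 0 else 0)
        else
          max (if (j : Int) > 0 then
             PySem.List.pyGetD (PySem.List.pyGetD dp' ((j : Int) - 1) []) w 0 else 0)
            ((PySem.List.pyGetD itens (j : Int) (0, 0)).2 +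
              (if (j : Int) > 0 then
                 PySem.List.pyGetD (PySem.List.pyGetD dp' ((j : Int) - 1) [])
                   (w - (PySem.List.pyGetD itens (j : Int) (0, 0)).1) 0 else 0)))
        = solveP itens (j : Int) w := by
      rw [solveP_step itens (by omega) hw1]
      by_cases hp : (PySem.List.pyGetD itens (j : Int) (0, 0)).1 > w
      · rw [if_pos hp, if_pos hp, hR1]
      · rw [if_neg hp, if_neg hp, hR1]
        congr 2
        by_cases hj0 : (j : Int) > 0
        · rw [if_pos hj0]
          have hj1 : 1 ≤ j := by omega
          have hx1 : (0 : Int) ≤ w - (PySem.List.pyGetD itens (j : Int) (0, 0)).1 := by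
            have := hpv hj1; omega
          have hx2 : w - (PySem.List.pyGetD itens (j : Int) (0, 0)).1 < cap + 1 := by
            have := hpv hj1; omega
          have hprev : PySem.List.pyGetD dp' ((j : Int) - 1) [] = rowT itens cap ((j : Int) - 1) := by
            rw [show (j : Int) - 1 = ((j - 1 : Nat) : Int) by omega, PySem.List.pyGetD_natCast,
              List.getD_eq_getElem _ _ (by rw [List.length_set, length_tabA]; omega),
              List.getElem_set, if_neg (by omega), getElem_tabA itens cap j (j - 1) (by omega),
              if_pos (by omega)]
          rw [hprev, rowT, PySem.List.pyGetD_map_pyRange_of_nonneg _ _ _ _ hx1 hx2]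
        · rw [if_neg hj0]
          exact (solveP_base itens (Or.inl (by omega))).symm
    rw [hreadj, hv, setRow itens cap (j : Int) w hw1 hw2,
      pySetD_nonneg _ _ (by omega), Int.toNat_natCast, List.set_set]

theorem outer_fold_A (itens : List (Int × Int)) (cap : Int)
    (hpre : Pre_tabela_lucro itens cap) :
    ∀ (m : Nat), m ≤ itens.length →
      (PySem.List.pyRange 0 (m : Int) 1).foldl (fun dp i =>
        (PySem.List.pyRange 1 (cap + 1) 1).foldl (fun dp w =>
        PySem.List.pySetD dp i
          (PySem.List.pySetD (PySem.List.pyGetD dp i []) w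
            (if (PySem.List.pyGetD itens i (0, 0)).1 > w then
               (if i > 0 then
                  PySem.List.pyGetD (PySem.List.pyGetD dp (i - 1) []) w 0 else 0)
             else
               max (if i > 0 then
                  PySem.List.pyGetD (PySem.List.pyGetD dp (i - 1) []) w 0 else 0)
                 ((PySem.List.pyGetD itens i (0, 0)).2 +
                   (if i > 0 then
                      PySem.List.pyGetD (PySem.List.pyGetD dp (i - 1) [])
                        (w - (PySem.List.pyGetD itens i (0, 0)).1) 0 else 0))))) dp)
        ((List.range itens.length).map (fun _ => List.replicate (cap + 1).toNat 0))
      = tabA itens cap m := by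
  intro m
  induction m with
  | zero =>
    intro _
    rw [show ((0 : Nat) : Int) = 0 by norm_num, PySem.List.pyRange_one_eq_nil (le_refl 0),
      List.foldl_nil]
    unfold tabA zerosA
    apply List.map_congr_left
    intro t _
    rw [if_neg (by omega)]
  | succ m ih =>
    intro hm
    have hm' : m < itens.length := by omega
    have hcast : (((m + 1 : Nat)) : Int) = (m : Int) + 1 := by push_cast; ring
    rw [hcast, PySem.List.pyRange_one_succ_right (a := 0) (b := (m : Int)) (by omega),
      List.foldl_append, ih (by omega), List.foldl_cons, List.foldl_nil]
    by_cases hcap : cap + 1 ≤ 1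
    · rw [PySem.List.pyRange_one_eq_nil hcap, List.foldl_nil]
      exact (tabA_succ_degenerate itens cap m (by omega)).symm
    · have hpre2 : ∀ item ∈ itens.tail, 0 ≤ item.1 := by
        rcases hpre with h | h
        · omega
        · exact h
      have hpv : 1 ≤ m → 0 ≤ (PySem.List.pyGetD itens (m : Int) (0, 0)).1 := fun h1 =>
        pv_tail_nonneg itens hpre2 m h1 hm'
      rw [show cap + 1 = ((cap.toNat : Int) + 1) by omega]
      rw [inner_fold_A itens cap m hm' hpv cap.toNat (by omega)]
      rw [show ((cap.toNat : Int) + 1) = cap + 1 by omega, partialRow_top]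
      exact tabA_succ itens cap m hm'

theorem a_eq (itens : List (Int × Int)) (capacidade_max : Int)
    (hpre : Pre_tabela_lucro itens capacidade_max) :
    tabela_lucro itens capacidade_max =
      (PySem.List.pyRange 0 (itens.length : Int) 1).map
        (fun i => (PySem.List.pyRange 0 (capacidade_max + 1) 1).map (solveP itens i)) := by
  unfold tabela_lucro
  dsimp only
  rw [outer_fold_A itens capacidade_max hpre itens.length le_rfl]
  rw [PySem.List.pyRange_zero_nat, List.map_map]
  unfold tabA
  apply List.map_congr_left
  intro t ht
  rw [List.mem_range] at ht
  rw [if_pos ht]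
  rfl

-- ===== VERDICT (by name: the statement is the Claim_ definition above) =====
theorem tabela_lucro_spec : Claim_equal_tabela_lucro := by
  intro itens cap _ hpre
  unfold Spec_tabela_lucro
  rw [alt_eq, a_eq itens cap hpre]
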